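-- pv_equiv track=rewrite | github.com/nghiatt90/cs-practice | codelearn/star.py | star
-- ===== SOURCE A (Python) =====
-- def star(n):
--     r = (n-1) * 4 + 1
--     c = (n + n - 1)*2 + n-1 + n-2
--
--     rows = ['*']
--     spaces = 1
--     for i in range(n-2):
--         rows.append('*' + (' '*spaces) + '*')
--         spaces += 2
--
--     half = ' '.join(['*'] * n)
--     rows.append(half + (' '*len(rows[-1])) + half)
--
--     for i in range(n-1):
--         rows.append('*' + (' '*(len(rows[-1])-4)) + '*')
--
--     last = list(rows[-1])
--     last[len(last)//2] = '*'
--     rows[-1] = ''.join(last)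
--
--     rows += rows[-2::-1]
--
--     for i in range(len(rows)):
--         rows[i] = rows[i].center(c)
--     return rows
-- ===== SOURCE B (Python) =====
-- def star(n):
--     # Paints each output row independently: star COORDINATES on a blank canvas
--     # (centering included as an offset), instead of concatenating space runs
--     # row-by-row from the previous row's length and mirroring a slice.
--     t = max(n - 2, 0)                    # rows of the upper point above the wide row
--     b = max(n - 1, 0)                    # rows between the wide row and the pivot
--     L = t + b + 2                        # rows in the upper half, pivot included
--     W = 2 * len(' '.join('*' * n)) + 2 * t + 1   # wide-row width
--     c = 6 * n - 5                        # canvas width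
--     out = []
--     for k in range(2 * L - 1):
--         j = min(k, 2 * L - 2 - k)        # fold the bottom half onto the top
--         if j <= t:                       # the point: two stars drifting apart
--             w, stars = 2 * j + 1, {0, 2 * j}
--         elif j == t + 1:                 # the wide row: two full arms
--             w = W
--             stars = {2 * i for i in range(n)} | {W - 1 - 2 * i for i in range(n)}
--         else:                            # the waist: edges closing in again
--             w = W - 2 * (j - t - 1)
--             stars = {0, w - 1}
--         if j == L - 1:                   # the pivot row carries the middle star
--             stars.add(w // 2)
--         width = max(w, c)
--         canvas = [' '] * width
--         off = (width - w) // 2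
--         for p in stars:
--             canvas[off + p] = '*'
--         out.append(''.join(canvas))
--     return out
-- ===== Notes on version B (the rewrite author's own statement) =====
-- stated objective: alternative
-- what changed: B renders each output row independently by painting a set of star COORDINATES onto a blank width-max(w,c) canvas (the centering becomes an offset, the middle star is just one more coordinate), instead of A's incremental row list whose widths cascade from len(rows[-1]), the joined-half wide row, the patch-by-list-surgery and the rows[-2::-1] mirror append.
import Mathlib
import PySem

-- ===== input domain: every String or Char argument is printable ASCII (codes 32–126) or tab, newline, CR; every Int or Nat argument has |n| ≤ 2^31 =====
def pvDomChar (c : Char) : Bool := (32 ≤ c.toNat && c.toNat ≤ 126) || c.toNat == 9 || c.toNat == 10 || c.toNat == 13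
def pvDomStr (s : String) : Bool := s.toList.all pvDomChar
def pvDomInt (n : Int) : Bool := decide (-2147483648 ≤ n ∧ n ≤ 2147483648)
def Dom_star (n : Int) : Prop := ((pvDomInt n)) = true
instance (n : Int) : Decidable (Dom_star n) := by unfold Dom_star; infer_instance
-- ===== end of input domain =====

-- B paints each row from a set of star coordinates on a blank canvas (centering
-- as an offset), instead of A's cascading row list, patch and mirror slice.

-- ===== PORT A =====
-- Python ' ' * k (k ≤ 0 gives ''; Int.toNat clamps exactly like Python's list/str multiplication)
def pyRep (ch : Char) (k : Int) : List Char := List.replicate k.toNat ch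
-- hand port of CPython str.center(w): marg = w - len, left pad = marg//2 + (marg & w & 1);
-- exact for every string and width (marg & w & 1 = marg%2 * w%2 since both are nonneg here)
def pyCenter (cs : List Char) (w : Int) : List Char :=
  let m := w.toNat - cs.length
  let l := m / 2 + m % 2 * (w.toNat % 2)
  List.replicate l ' ' ++ cs ++ List.replicate (m - l) ' '

def star (n : Int) : List String :=
  let _r := (n - 1) * 4 + 1
  let c := (n + n - 1) * 2 + n - 1 + n - 2
  -- rows = ['*']; spaces = 1; for i in range(n-2): rows.append('*'+' '*spaces+'*'); spaces += 2
  let st := (PySem.List.pyRange 0 (n - 2) 1).foldl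
      (fun (st : List (List Char) × Int) _ =>
        (st.1 ++ [['*'] ++ pyRep ' ' st.2 ++ ['*']], st.2 + 2))
      ([['*']], 1)
  let rows := st.1
  let half := PySem.Chars.join [' '] (List.replicate n.toNat ['*'])
  -- rows[-1] via pyGetD (rows is never empty: it starts as ['*'] and only grows)
  let rows := rows ++ [half ++ pyRep ' ' (PySem.Chars.len (PySem.List.pyGetD rows (-1) [])) ++ half]
  let rows := (PySem.List.pyRange 0 (n - 1) 1).foldl
      (fun rs _ => rs ++ [['*'] ++ pyRep ' ' (PySem.Chars.len (PySem.List.pyGetD rs (-1) []) - 4) ++ ['*']])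
      rows
  let last := PySem.List.pyGetD rows (-1) []
  let last := PySem.List.pySetD last (PySem.Int.floordiv (PySem.Chars.len last) 2) '*'
  let rows := PySem.List.pySetD rows (-1) last
  let rows := rows ++ ((PySem.List.slice? rows (some (-2)) none (-1)).getD [])
  rows.map (fun row => String.ofList (pyCenter row c))

-- ===== PORT B =====
def star_alt (n : Int) : List String :=
  let t := max (n - 2) 0
  let b := max (n - 1) 0
  let L := t + b + 2
  let W := 2 * PySem.Chars.len (PySem.Chars.join [' '] (List.replicate n.toNat ['*'])) + 2 * t + 1
  let c := 6 * n - 5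
  (PySem.List.pyRange 0 (2 * L - 1) 1).foldl (fun out k =>
    let j := min k (2 * L - 2 - k)
    let ws : Int × PySem.Set Int :=
      if j ≤ t then (2 * j + 1, PySem.Set.ofList [0, 2 * j])
      else if j = t + 1 then
        (W, PySem.Set.union (PySem.Set.ofList ((PySem.List.pyRange 0 n 1).map (fun i => 2 * i)))
              (PySem.Set.ofList ((PySem.List.pyRange 0 n 1).map (fun i => W - 1 - 2 * i))))
      else (W - 2 * (j - t - 1), PySem.Set.ofList [0, W - 2 * (j - t - 1) - 1])
    let stars := if j = L - 1 then PySem.Set.add ws.2 (PySem.Int.floordiv ws.1 2) else ws.2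
    let width := max ws.1 c
    let off := PySem.Int.floordiv (width - ws.1) 2
    -- 'for p in stars: canvas[off+p] = "*"': order-independent (every write is '*')
    let canvas := stars.foldl (fun cv p => PySem.List.pySetD cv (off + p) '*')
        (List.replicate width.toNat ' ')
    out ++ [String.ofList canvas]) []

-- ===== PRECONDITION & SPEC =====
def Spec_star (n : Int) (out : List String) : Prop := out = star_alt n
instance (n : Int) (out : List String) : Decidable (Spec_star n out) := by unfold Spec_star; infer_instance

-- ===== CLAIM (what is proved, stated in full; the proofs are below) =====
def Claim_equal_star : Prop := ∀ (n : Int), Dom_star n → Spec_star n (star n)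

-- ===== LEMMAS AND PROOFS =====

def halfRow (m : Nat) : List Char := PySem.Chars.join [' '] (List.replicate (m+2) ['*'])
def wideRow (m : Nat) : List Char := halfRow m ++ List.replicate (2*m+1) ' ' ++ halfRow m
def d1row (i : Nat) : List Char := ['*'] ++ List.replicate (2*i+1) ' ' ++ ['*']
def d2row (m i : Nat) : List Char := ['*'] ++ List.replicate (6*m+3-2*i) ' ' ++ ['*']
def pivotRow (m : Nat) : List Char :=
  ['*'] ++ List.replicate (2*m+1) ' ' ++ (['*'] ++ List.replicate (2*m+1) ' ' ++ ['*'])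
def preRows (m : Nat) : List (List Char) :=
  ([['*']] ++ (List.range m).map d1row ++ [wideRow m]) ++ (List.range m).map (d2row m)
def allRows (m : Nat) : List (List Char) :=
  (preRows m ++ [pivotRow m]) ++ (preRows m).reverse
def browJ (m j : Nat) : List Char :=
  if j = 0 then ['*']
  else if j ≤ m then ['*'] ++ List.replicate (2*j-1) ' ' ++ ['*']
  else if j = m+1 then wideRow m
  else if j ≤ 2*m+1 then ['*'] ++ List.replicate (8*m+7-2*j) ' ' ++ ['*']
  else pivotRow m
def brow (m k : Nat) : List Char := browJ m (min k (4*m+4-k))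

lemma pyRep_eq_replicate (k : Int) (k' : Nat) (h : k.toNat = k') :
    pyRep ' ' k = List.replicate k' ' ' := by rw [pyRep, h]

lemma loopA1 (l : List Int) (rs : List (List Char)) (s : Int) :
    l.foldl (fun (st : List (List Char) × Int) _ =>
        (st.1 ++ [['*'] ++ pyRep ' ' st.2 ++ ['*']], st.2 + 2)) (rs, s)
      = (rs ++ (List.range l.length).map
            (fun (i : Nat) => ['*'] ++ pyRep ' ' (s + 2 * (i : Int)) ++ ['*']),
         s + 2 * l.length) := by
  induction l generalizing rs s with
  | nil => simp
  | cons a t ih =>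
      simp only [List.foldl_cons, ih, List.length_cons]
      refine Prod.ext ?_ (by push_cast; ring)
      rw [List.range_succ_eq_map]
      simp only [List.map_cons, List.map_map, List.append_assoc, List.singleton_append,
        Nat.cast_zero, mul_zero, add_zero]
      congr 1
      refine List.cons_eq_cons.mpr ⟨rfl, ?_⟩
      apply List.map_congr_left
      intro i _
      simp only [Function.comp]
      have h2 : s + 2 + 2 * (i : Int) = s + 2 * ((i : Int) + 1) := by ring
      rw [h2]
      norm_num

-- A's second loop, generalized: each appended row is sized from the previous row's length
lemma loopA2 (l : List Int) (R : List (List Char)) (r : List Char)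
    (h : 2 * l.length + 2 ≤ r.length) :
    l.foldl (fun rs _ =>
        rs ++ [['*'] ++ pyRep ' ' (PySem.Chars.len (PySem.List.pyGetD rs (-1) []) - 4) ++ ['*']])
      (R ++ [r])
      = (R ++ [r]) ++ (List.range l.length).map
          (fun (i : Nat) => ['*'] ++ pyRep ' ' ((r.length : Int) - 4 - 2 * (i : Int)) ++ ['*']) := by
  induction l generalizing R r with
  | nil => simp
  | cons a t ih =>
      simp only [List.foldl_cons, PySem.List.pyGetD_neg_one_append_singleton, PySem.Chars.len_eq]
      have h4 : 4 ≤ r.length := by simp at h; omega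
      have hlen : (['*'] ++ pyRep ' ' ((r.length : Int) - 4) ++ ['*']).length = r.length - 2 := by
        simp [pyRep]; omega
      have harg : 2 * t.length + 2 ≤ (['*'] ++ pyRep ' ' ((r.length : Int) - 4) ++ ['*']).length := by
        rw [hlen]; simp [List.length_cons] at h; omega
      have step := ih (R ++ [r]) (['*'] ++ pyRep ' ' ((r.length : Int) - 4) ++ ['*']) harg
      simp only [PySem.Chars.len_eq] at step
      rw [step, hlen, List.length_cons, List.range_succ_eq_map]
      simp only [List.map_cons, List.map_map, List.append_assoc, Nat.cast_zero, mul_zero, sub_zero]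
      congr 2
      rw [List.singleton_append]
      refine List.cons_eq_cons.mpr ⟨rfl, ?_⟩
      apply List.map_congr_left
      intro i _
      simp only [Function.comp]
      have hc : ((r.length - 2 : Nat) : Int) - 4 - 2 * (i : Int)
          = (r.length : Int) - 4 - 2 * ((i : Int) + 1) := by omega
      rw [hc]
      norm_num

lemma filterMap_getElem?_range {α : Type} (l : List α) :
    List.filterMap (fun k => l[k]?) (List.range l.length) = l := by
  induction l with
  | nil => simp
  | cons a t ih =>
      rw [List.length_cons, List.range_succ_eq_map]
      rw [List.filterMap_cons, List.filterMap_map]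
      simpa [Function.comp] using ih

lemma slice_neg_two_rev {α : Type} (xs : List α) (h : 2 ≤ xs.length) :
    PySem.List.slice? xs (some (-2)) none (-1) = some xs.dropLast.reverse := by
  unfold PySem.List.slice? PySem.List.sliceIndices
  norm_num
  have h1 : max (-2 + (xs.length : Int)) (-1) = (xs.length : Int) - 2 := by omega
  rw [h1, if_pos (by omega : 1 < xs.length)]
  have h2 : ((xs.length : Int) - 2 + 1).toNat = xs.length - 1 := by omega
  rw [h2]
  have hlen : xs.dropLast.reverse.length = xs.length - 1 := by simp
  have h3 : ∀ k ∈ List.range (xs.length - 1),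
      xs[((xs.length : Int) - 2 + -(k : Int)).toNat]? = xs.dropLast.reverse[k]? := by
    intro k hk
    have hk' : k < xs.length - 1 := List.mem_range.mp hk
    have ht : ((xs.length : Int) - 2 + -(k : Int)).toNat = xs.length - 2 - k := by omega
    rw [ht]
    rw [List.getElem?_eq_getElem (by omega), List.getElem?_eq_getElem (by rw [hlen]; omega)]
    congr 1
    rw [List.getElem_reverse, List.getElem_dropLast]
    congr 1
    simp [List.length_dropLast]
    omega
  rw [List.filterMap_congr h3]
  rw [← hlen, filterMap_getElem?_range]

lemma pySetD_neg_one_append {α : Type} (xs : List α) (x v : α) :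
    PySem.List.pySetD (xs ++ [x]) (-1) v = xs ++ [v] := by
  simp [PySem.List.pySetD, PySem.List.pySet?, PySem.List.pyIdx?]

lemma len_halfRow (m : Nat) : (halfRow m).length = 2*m+3 := by
  induction m with
  | zero => decide
  | succ j ih =>
      rw [halfRow] at ih ⊢
      rw [show j+1+2 = (j+2)+1 from rfl, List.replicate_succ,
        show List.replicate (j+2) ['*'] = ['*'] :: List.replicate (j+1) ['*'] from
          List.replicate_succ .., PySem.Chars.join_cons_cons]
      rw [show List.replicate (j+2) ['*'] = ['*'] :: List.replicate (j+1) ['*'] from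
          List.replicate_succ ..] at ih
      simp at ih ⊢
      omega

lemma last_row1 (m : Nat) :
    (PySem.List.pyGetD ([['*']] ++ (List.range m).map
        (fun (i : Nat) => ['*'] ++ pyRep ' ' ((1:Int) + 2 * (i : Int)) ++ ['*'])) (-1) []).length
      = 2*m+1 := by
  cases m with
  | zero => decide
  | succ k =>
      rw [List.range_succ, List.map_append, ← List.append_assoc, List.map_singleton,
        PySem.List.pyGetD_neg_one_append_singleton]
      simp [pyRep]
      omega

lemma set_mid (m : Nat) :
    (['*'] ++ List.replicate (4*m+3) ' ' ++ ['*']).set (2*m+2) '*' = pivotRow m := by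
  rw [show (4*m+3) = (2*m+1) + (2*m+2) from by omega, List.replicate_add]
  rw [List.singleton_append, List.cons_append]
  rw [show 2*m+2 = (2*m+1)+1 from by omega, List.set_cons_succ]
  rw [List.append_assoc, List.set_append]
  rw [if_neg (by simp)]
  simp only [List.length_replicate, Nat.sub_self]
  rw [show List.replicate (2*m+1+1) ' ' = ' ' :: List.replicate (2*m+1) ' ' from
    List.replicate_succ .., List.cons_append, List.set_cons_zero]
  simp [pivotRow, List.replicate_succ]

lemma starA_eval (m : Nat) : _root_.star ((m:Int)+2)
    = (allRows m).map (fun row => String.ofList (pyCenter row (6*(m:Int)+7))) := by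
  unfold _root_.star
  dsimp only
  rw [show ((m:Int) + 2 - 2) = (m:Int) from by ring]
  rw [show ((m:Int) + 2).toNat = m + 2 from by omega]
  rw [show (((m:Int)+2) + ((m:Int)+2) - 1) * 2 + ((m:Int)+2) - 1 + ((m:Int)+2) - 2
      = 6*(m:Int)+7 from by ring]
  rw [loopA1]
  dsimp only
  rw [PySem.List.length_pyRange_one, show ((m:Int) - 0).toNat = m from by omega]
  simp only [PySem.Chars.len_eq, last_row1]
  rw [pyRep_eq_replicate ((2*m+1 : Nat) : Int) (2*m+1) (by omega)]
  rw [show PySem.Chars.join [' '] (List.replicate (m+2) ['*']) = halfRow m from rfl]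
  rw [show halfRow m ++ List.replicate (2*m+1) ' ' ++ halfRow m = wideRow m from rfl]
  have hW : (wideRow m).length = 6*m+7 := by
    have := len_halfRow m
    simp [wideRow, this]
    omega
  have hcond : 2 * (PySem.List.pyRange 0 ((m:Int)+2-1) 1).length + 2 ≤ (wideRow m).length := by
    rw [PySem.List.length_pyRange_one, hW]
    omega
  have lp2 := loopA2 (PySem.List.pyRange 0 ((m:Int)+2-1) 1)
    ([['*']] ++ (List.range m).map (fun (i:Nat) => ['*'] ++ pyRep ' ' (1 + 2*(i:Int)) ++ ['*']))
    (wideRow m) hcond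
  simp only [PySem.Chars.len_eq] at lp2
  rw [lp2]
  rw [hW, PySem.List.length_pyRange_one, show ((m:Int)+2-1 - 0).toNat = m+1 from by omega]
  rw [List.range_succ]
  rw [show List.map (fun (i:Nat) => ['*'] ++ pyRep ' ' (((6*m+7:Nat):Int) - 4 - 2*(i:Int)) ++ ['*'])
        (List.range m ++ [m])
      = List.map (fun (i:Nat) => ['*'] ++ pyRep ' ' (((6*m+7:Nat):Int) - 4 - 2*(i:Int)) ++ ['*'])
          (List.range m)
        ++ [['*'] ++ pyRep ' ' (((6*m+7:Nat):Int) - 4 - 2*(m:Int)) ++ ['*']] from by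
    rw [List.map_append, List.map_singleton]]
  rw [← List.append_assoc]
  rw [PySem.List.pyGetD_neg_one_append_singleton]
  rw [pyRep_eq_replicate (((6*m+7 : Nat) : Int) - 4 - 2*(m:Int)) (4*m+3) (by omega)]
  rw [show (['*'] ++ List.replicate (4*m+3) ' ' ++ ['*']).length = 4*m+5 from by simp]
  rw [show PySem.Int.floordiv ((4*m+5 : Nat) : Int) 2 = ((2*m+2 : Nat) : Int) from by
    rw [show ((2:Int)) = ((2:Nat):Int) from rfl, PySem.Int.floordiv_natCast]
    congr 1
    omega]
  rw [PySem.List.pySetD_natCast, set_mid]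
  rw [pySetD_neg_one_append]
  rw [slice_neg_two_rev _ (by simp; omega), Option.getD_some, List.dropLast_concat]
  have hmap1 : List.map (fun (i:Nat) => ['*'] ++ pyRep ' ' (1 + 2*(i:Int)) ++ ['*']) (List.range m)
      = (List.range m).map d1row := by
    apply List.map_congr_left
    intro i _
    rw [pyRep_eq_replicate _ (2*i+1) (by omega), d1row]
  have hmap2 : List.map (fun (i:Nat) => ['*'] ++ pyRep ' ' (((6*m+7:Nat):Int) - 4 - 2*(i:Int)) ++ ['*'])
        (List.range m)
      = (List.range m).map (d2row m) := by
    apply List.map_congr_left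
    intro i hi
    have him : i < m := List.mem_range.mp hi
    rw [pyRep_eq_replicate _ (6*m+3-2*i) (by omega), d2row]
  rw [hmap1, hmap2]
  rw [allRows, preRows]

lemma getElem_pre (m j : Nat) (hj : j < 2*m+3) :
    (preRows m ++ [pivotRow m])[j]'(by simp [preRows]; omega) = browJ m j := by
  unfold preRows browJ
  simp only [List.getElem_append, List.length_append, List.length_map, List.length_range,
    List.length_cons, List.length_nil]
  split_ifs <;> first
    | omega
    | (simp [List.getElem_map, List.getElem_range, d1row, d2row] <;> try omega)

lemma preRows_length (m : Nat) : (preRows m).length = 2*m+2 := by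
  simp [preRows]
  omega

lemma preRows_getElem' (m j : Nat) (hj : j < 2*m+2) :
    (preRows m)[j]'(by rw [preRows_length]; omega) = browJ m j := by
  rw [← List.getElem_append_left (bs := [pivotRow m]) (by rw [preRows_length]; omega)]
  exact getElem_pre m j (by omega)

lemma brow_eq_browJ_left (m k : Nat) (h : k ≤ 2*m+2) : brow m k = browJ m k := by
  unfold brow
  rw [show min k (4*m+4-k) = k from by omega]

lemma allRows_eq (m : Nat) : allRows m = (List.range (4*m+5)).map (brow m) := by
  apply List.ext_getElem
  · simp [allRows, preRows]
    omega
  · intro k h1 h2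
    rw [List.getElem_map, List.getElem_range]
    have hk : k < 4*m+5 := by
      have := h2; simpa using this
    have hlen1 : (preRows m ++ [pivotRow m]).length = 2*m+3 := by
      simp [preRows_length]
    unfold allRows
    by_cases hcase : k < 2*m+3
    · rw [List.getElem_append_left (by rw [hlen1]; omega)]
      rw [getElem_pre m k (by omega)]
      exact (brow_eq_browJ_left m k (by omega)).symm
    · rw [List.getElem_append_right (by rw [hlen1]; omega)]
      rw [List.getElem_reverse]
      rw [getElem_congr rfl (by rw [hlen1, preRows_length]; omega :
            (preRows m).length - 1 - (k - (preRows m ++ [pivotRow m]).length) = 4*m+4-k)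
          (by rw [preRows_length]; omega)]
      rw [preRows_getElem' m (4*m+4-k) (by omega)]
      unfold brow
      rw [show min k (4*m+4-k) = 4*m+4-k from by omega]

-- ===== B-side lemmas: painting a coordinate set equals the concatenated row =====

lemma halfRow_succ (k : Nat) : halfRow (k+1) = '*' :: ' ' :: halfRow k := by
  rw [halfRow, show k+1+2 = (k+2)+1 from rfl,
    show List.replicate ((k+2)+1) ['*'] = ['*'] :: List.replicate (k+2) ['*'] from
      List.replicate_succ .., halfRow]
  rcases Nat.exists_eq_add_of_le (by omega : 1 ≤ k+2) with ⟨j, hj⟩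
  rw [show k+2 = j+1 from by omega,
    show List.replicate (j+1) ['*'] = ['*'] :: List.replicate j ['*'] from
      List.replicate_succ .., PySem.Chars.join_cons_cons]
  rfl


lemma halfRow_eq (m : Nat) :
    halfRow m = (List.range (2*m+3)).map (fun q => if q % 2 = 0 then '*' else ' ') := by
  induction m with
  | zero => decide
  | succ k ih =>
      rw [halfRow_succ, ih]
      conv_rhs => rw [show 2*(k+1)+3 = 2+(2*k+3) from by omega, List.range_add]
      rw [List.map_append, List.map_map]
      rw [show (List.range 2).map (fun q => if q % 2 = 0 then '*' else ' ') = ['*', ' '] from rfl]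
      simp only [List.cons_append, List.nil_append]
      congr 1
      congr 1
      apply List.map_congr_left
      intro q _
      simp only [Function.comp]
      have : (2+q) % 2 = q % 2 := by omega
      rw [this]


lemma getElem?_range_map {α : Type} (g : Nat → α) (n i : Nat) :
    ((List.range n).map g)[i]? = if i < n then some (g i) else none := by
  by_cases h : i < n
  · rw [if_pos h, List.getElem?_eq_getElem (by simpa using h)]
    simp
  · rw [if_neg h, List.getElem?_eq_none (by simpa using Nat.le_of_not_lt h)]


lemma wide_eq (m : Nat) :
    halfRow m ++ List.replicate (2*m+1) ' ' ++ halfRow m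
      = (List.range (6*m+7)).map
          (fun q => if (q ≤ 2*m+2 ∨ 4*m+4 ≤ q) ∧ q % 2 = 0 then '*' else ' ') := by
  have hsplit : (List.range (6*m+7)).map
        (fun q => if (q ≤ 2*m+2 ∨ 4*m+4 ≤ q) ∧ q % 2 = 0 then '*' else ' ')
      = (List.range (2*m+3)).map
          (fun q => if (q ≤ 2*m+2 ∨ 4*m+4 ≤ q) ∧ q % 2 = 0 then '*' else ' ')
        ++ (List.range (2*m+1)).map
          (fun x => if ((2*m+3)+x ≤ 2*m+2 ∨ 4*m+4 ≤ (2*m+3)+x) ∧ ((2*m+3)+x) % 2 = 0 then '*' else ' ')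
        ++ (List.range (2*m+3)).map
          (fun x => if ((4*m+4)+x ≤ 2*m+2 ∨ 4*m+4 ≤ (4*m+4)+x) ∧ ((4*m+4)+x) % 2 = 0 then '*' else ' ') := by
    rw [show 6*m+7 = (2*m+3)+((2*m+1)+(2*m+3)) from by omega]
    rw [List.range_add (n := (2*m)+3) (m := (2*m+1)+(2*m+3))]
    rw [List.range_add (n := (2*m)+1) (m := (2*m)+3)]
    simp only [List.map_append, List.map_map, List.append_assoc]
    congr 2
    all_goals
      apply List.map_congr_left
      intro x _
      simp only [Function.comp]
      try
        by_cases h2 : (4*m+4+x) % 2 = 0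
        · rw [if_pos ⟨Or.inr (by omega), by omega⟩, if_pos ⟨Or.inr (by omega), h2⟩]
        · rw [if_neg (by omega), if_neg (by omega)]
  rw [hsplit]
  congr 1
  congr 1
  · rw [halfRow_eq]
    apply List.map_congr_left
    intro q hq
    have hq' : q < 2*m+3 := List.mem_range.mp hq
    by_cases h2 : q % 2 = 0
    · rw [if_pos h2, if_pos ⟨by omega, h2⟩]
    · rw [if_neg h2, if_neg (by omega)]
  · have : ∀ q ∈ List.range (2*m+1),
        (fun x => if ((2*m+3)+x ≤ 2*m+2 ∨ 4*m+4 ≤ (2*m+3)+x) ∧ ((2*m+3)+x) % 2 = 0 then '*' else ' ') q = ' ' := by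
      intro q hq
      have hq' : q < 2*m+1 := List.mem_range.mp hq
      simp only
      rw [if_neg (by omega)]
    rw [List.map_congr_left this, List.map_const', List.length_range]
  · rw [halfRow_eq]
    apply List.map_congr_left
    intro q hq
    have hq' : q < 2*m+3 := List.mem_range.mp hq
    by_cases h2 : q % 2 = 0
    · rw [if_pos h2, if_pos ⟨by omega, by omega⟩]
    · rw [if_neg h2, if_neg (by omega)]


lemma getElem?_foldl_pySetD (ps : List Int) (base : List Char)
    (hp : ∀ p ∈ ps, 0 ≤ p) (q : Nat) :
    (ps.foldl (fun cv p => PySem.List.pySetD cv p '*') base)[q]?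
      = if ∃ p ∈ ps, p = (q : Int) then (if q < base.length then some '*' else base[q]?) else base[q]? := by
  induction ps generalizing base with
  | nil => simp
  | cons a l ih =>
      have ha0 : 0 ≤ a := hp a (List.mem_cons_self ..)
      rw [List.foldl_cons, ih _ (fun p h => hp p (List.mem_cons_of_mem a h)),
        PySem.List.pySetD_of_nonneg base '*' ha0, List.length_set]
      by_cases hl : ∃ p ∈ l, p = (q:Int)
      · have hcl : ∃ p ∈ a :: l, p = (q:Int) := by
          obtain ⟨p, hm, he⟩ := hl
          exact ⟨p, List.mem_cons_of_mem a hm, he⟩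
        rw [if_pos hl, if_pos hcl]
        by_cases hq : q < base.length
        · rw [if_pos hq, if_pos hq]
        · rw [if_neg hq, if_neg hq, List.getElem?_set]
          split_ifs with h1 h2
          · exact absurd (h1 ▸ h2) hq
          · rw [List.getElem?_eq_none (by omega)]
          · rfl
      · rw [if_neg hl, List.getElem?_set]
        by_cases ha : a = (q:Int)
        · have hat : a.toNat = q := by omega
          have hcl : ∃ p ∈ a :: l, p = (q:Int) := ⟨a, List.mem_cons_self .., ha⟩
          rw [if_pos hat, if_pos hcl, hat]
          by_cases hq : q < base.length
          · rw [if_pos hq, if_pos hq]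
          · rw [if_neg hq, if_neg hq, List.getElem?_eq_none (by omega)]
        · have hat : ¬ a.toNat = q := by omega
          have hcl : ¬ ∃ p ∈ a :: l, p = (q:Int) := by
            rintro ⟨p, hpm, hpq⟩
            rcases List.mem_cons.mp hpm with h | h
            · exact ha (h ▸ hpq)
            · exact hl ⟨p, h, hpq⟩
          rw [if_neg hat, if_neg hcl]


lemma paint_eq_map (ps : List Int) (C : Nat) (hp : ∀ p ∈ ps, 0 ≤ p) :
    ps.foldl (fun cv p => PySem.List.pySetD cv p '*') (List.replicate C ' ')
      = (List.range C).map (fun (q : Nat) => if ∃ p ∈ ps, p = (q : Int) then '*' else ' ') := by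
  apply List.ext_getElem?
  intro i
  rw [getElem?_foldl_pySetD ps _ hp i, getElem?_range_map, List.getElem?_replicate,
    List.length_replicate]
  split_ifs <;> rfl


lemma shape1 (A B q : Nat) :
    (List.replicate A ' ' ++ ['*'] ++ List.replicate B ' ')[q]?
      = if q < A+1+B then some (if q = A then '*' else ' ') else none := by
  simp only [List.getElem?_append, List.length_replicate, List.length_append, List.length_cons,
    List.length_nil, List.getElem?_cons, List.getElem?_replicate]
  split_ifs <;> first | rfl | omega


lemma shape2 (A G B q : Nat) :
    (List.replicate A ' ' ++ (['*'] ++ List.replicate G ' ' ++ ['*']) ++ List.replicate B ' ')[q]?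
      = if q < A+(G+2)+B then some (if q = A ∨ q = A+G+1 then '*' else ' ') else none := by
  simp only [List.getElem?_append, List.getElem?_replicate, List.length_replicate,
    List.length_append, List.length_cons, List.length_nil, List.getElem?_cons,
    List.cons_append, List.nil_append]
  split_ifs <;> first | rfl | omega


lemma shape3 (A G1 G2 B q : Nat) :
    (List.replicate A ' ' ++ (['*'] ++ List.replicate G1 ' ' ++ (['*'] ++ List.replicate G2 ' ' ++ ['*'])) ++ List.replicate B ' ')[q]?
      = if q < A+(G1+G2+3)+B then some (if q = A ∨ q = A+G1+1 ∨ q = A+G1+G2+2 then '*' else ' ') else none := by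
  simp only [List.getElem?_append, List.getElem?_replicate, List.length_replicate,
    List.length_append, List.length_cons, List.length_nil, List.getElem?_cons,
    List.cons_append, List.nil_append]
  split_ifs <;> first | rfl | omega



lemma row1_eq_map (A B : Nat) :
    List.replicate A ' ' ++ ['*'] ++ List.replicate B ' '
      = (List.range (A+1+B)).map (fun q => if q = A then '*' else ' ') := by
  apply List.ext_getElem?
  intro i
  rw [shape1, getElem?_range_map]


lemma row2_eq_map (A G B : Nat) :
    List.replicate A ' ' ++ (['*'] ++ List.replicate G ' ' ++ ['*']) ++ List.replicate B ' '
      = (List.range (A+(G+2)+B)).map (fun q => if q = A ∨ q = A+G+1 then '*' else ' ') := by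
  apply List.ext_getElem?
  intro i
  rw [shape2, getElem?_range_map]


lemma row3_eq_map (A G1 G2 B : Nat) :
    List.replicate A ' ' ++ (['*'] ++ List.replicate G1 ' ' ++ (['*'] ++ List.replicate G2 ' ' ++ ['*'])) ++ List.replicate B ' '
      = (List.range (A+(G1+G2+3)+B)).map
          (fun q => if q = A ∨ q = A+G1+1 ∨ q = A+G1+G2+2 then '*' else ' ') := by
  apply List.ext_getElem?
  intro i
  rw [shape3, getElem?_range_map]


lemma center_odd (cs : List Char) (w : Int) (A : Nat) (hw : w.toNat = 2*A + cs.length) :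
    pyCenter cs w = List.replicate A ' ' ++ cs ++ List.replicate A ' ' := by
  unfold pyCenter
  dsimp only
  rw [hw]
  rw [show 2*A + cs.length - cs.length = 2*A from by omega]
  rw [show (2*A)%2 = 0 from by omega]
  rw [show (2*A)/2 + 0 * ((2*A+cs.length)%2) = A from by omega]
  rw [show 2*A - A = A from by omega]


-- ===== the B port, evaluated =====

lemma starB_eval (m : Nat) : star_alt ((m:Int)+2)
    = (List.range (4*m+5)).map (fun k => String.ofList (pyCenter (brow m k) (6*(m:Int)+7))) := by
  unfold star_alt
  dsimp only
  rw [show max ((m:Int)+2-2) 0 = (m:Int) from by omega]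
  rw [show max ((m:Int)+2-1) 0 = (m:Int)+1 from by omega]
  rw [show ((m:Int)+2).toNat = m+2 from by omega]
  rw [show PySem.Chars.join [' '] (List.replicate (m+2) ['*']) = halfRow m from rfl]
  rw [PySem.Chars.len_eq, len_halfRow]
  rw [show (2:Int) * ((2*m+3 : Nat):Int) + 2*(m:Int) + 1 = 6*(m:Int)+7 from by push_cast; ring]
  rw [show (6:Int)*((m:Int)+2)-5 = 6*(m:Int)+7 from by ring]
  rw [show (2:Int)*((m:Int)+((m:Int)+1)+2)-1 = ((4*m+5:Nat):Int) from by push_cast; ring]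
  rw [show (2:Int)*((m:Int)+((m:Int)+1)+2)-2 = ((4*m+4:Nat):Int) from by push_cast; ring]
  rw [show (m:Int)+((m:Int)+1)+2-1 = ((2*m+2:Nat):Int) from by push_cast; ring]
  rw [PySem.List.foldl_append_singleton_eq_map]
  rw [PySem.List.pyRange_one 0 ((4*m+5:Nat):Int), show (((4*m+5:Nat):Int) - 0).toNat = 4*m+5 from by omega, List.map_map]
  rw [List.nil_append]
  apply List.map_congr_left
  intro k hk
  have hk' : k < 4*m+5 := List.mem_range.mp hk
  simp only [Function.comp]
  rw [show min (0 + (k:Int)) (((4*m+4:Nat):Int) - (0+(k:Int))) = ((min k (4*m+4-k):Nat):Int) from by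
    push_cast; omega]
  simp only [brow]
  generalize hg : min k (4*m+4-k) = jn
  have hjn : jn ≤ 2*m+2 := by omega
  by_cases h0 : jn ≤ m
  · -- the outer point rows
    rw [if_pos (by exact_mod_cast h0 : ((jn:Nat):Int) ≤ (m:Int))]
    dsimp only
    rw [if_neg (by push_cast; omega : ¬ ((jn:Nat):Int) = ((2*m+2:Nat):Int))]
    rw [show max (2*((jn:Nat):Int)+1) (6*(m:Int)+7) = 6*(m:Int)+7 from by omega]
    rw [show ((6:Int)*(m:Int)+7).toNat = 6*m+7 from by omega]
    rw [show (6:Int)*(m:Int)+7 - (2*((jn:Nat):Int)+1) = ((2*(3*m+3-jn):Nat):Int) from by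
      push_cast; omega]
    rw [show (2:Int) = ((2:Nat):Int) from rfl, PySem.Int.floordiv_natCast]
    rw [show ((2*(3*m+3-jn))/2 : Nat) = 3*m+3-jn from by omega]
    rw [← List.foldl_map (f := fun p => ((3*m+3-jn : Nat):Int) + p)
      (g := fun cv p => PySem.List.pySetD cv p '*')]
    rw [paint_eq_map _ (6*m+7) (by
      intro p hp
      rcases List.mem_map.mp hp with ⟨x, hx, rfl⟩
      rcases List.mem_cons.mp ((PySem.Set.mem_ofList ..).mp hx) with h | h
      · omega
      · rcases List.mem_cons.mp h with h' | h'
        · rw [h']; positivity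
        · simp at h')]
    by_cases hz : jn = 0
    · subst hz
      rw [show browJ m 0 = ['*'] from by simp [browJ]]
      rw [center_odd ['*'] (6*(m:Int)+7) (3*m+3) (by simp; omega)]
      rw [row1_eq_map, show (3*m+3)+1+(3*m+3) = 6*m+7 from by omega]
      congr 1
      apply List.map_congr_left
      intro q hq
      have hq' : q < 6*m+7 := List.mem_range.mp hq
      refine if_congr ?_ rfl rfl
      simp only [List.mem_map, PySem.Set.mem_ofList, List.mem_cons, List.not_mem_nil, or_false,
        exists_eq_or_imp, exists_eq_left, exists_eq_right]
      push_cast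
      omega
    · rw [show browJ m jn = ['*'] ++ List.replicate (2*jn-1) ' ' ++ ['*'] from by
        unfold browJ; rw [if_neg hz, if_pos h0]]
      rw [show (['*'] ++ List.replicate (2*jn-1) ' ' ++ ['*'] : List Char)
          = ['*'] ++ (List.replicate (2*jn-1) ' ' ++ ['*']) from by simp]
      rw [center_odd _ (6*(m:Int)+7) (3*m+3-jn) (by simp; omega)]
      rw [show (['*'] ++ (List.replicate (2*jn-1) ' ' ++ ['*']) : List Char)
          = ['*'] ++ List.replicate (2*jn-1) ' ' ++ ['*'] from by simp]
      rw [row2_eq_map, show (3*m+3-jn)+((2*jn-1)+2)+(3*m+3-jn) = 6*m+7 from by omega]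
      congr 1
      apply List.map_congr_left
      intro q hq
      have hq' : q < 6*m+7 := List.mem_range.mp hq
      refine if_congr ?_ rfl rfl
      simp only [List.mem_map, PySem.Set.mem_ofList, List.mem_cons, List.not_mem_nil, or_false,
        exists_eq_or_imp, exists_eq_left, exists_eq_right]
      push_cast
      omega
  · rw [if_neg (by omega)]
    by_cases h1 : jn = m+1
    · -- the wide row
      subst h1
      rw [if_pos (by push_cast; omega)]
      dsimp only
      rw [if_neg (by push_cast; omega : ¬ (((m+1:Nat):Int)) = ((2*m+2:Nat):Int))]
      rw [max_self]
      rw [show ((6:Int)*(m:Int)+7).toNat = 6*m+7 from by omega]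
      rw [show (6:Int)*(m:Int)+7 - (6*(m:Int)+7) = ((0:Nat):Int) from by omega]
      rw [show PySem.Int.floordiv (((0:Nat)):Int) 2 = ((0:Nat):Int) from by decide]
      rw [PySem.List.pyRange_one 0 ((m:Int)+2), show (((m:Int)+2)-0).toNat = m+2 from by omega]
      rw [List.map_map, List.map_map]
      rw [← List.foldl_map (f := fun p => ((0 : Nat):Int) + p)
        (g := fun cv p => PySem.List.pySetD cv p '*')]
      rw [paint_eq_map _ (6*m+7) (by
        intro p hp
        rcases List.mem_map.mp hp with ⟨x, hx, rfl⟩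
        rcases (PySem.Set.mem_union ..).mp hx with h | h <;>
          rcases List.mem_map.mp ((PySem.Set.mem_ofList ..).mp h) with ⟨i, hi, rfl⟩ <;>
          have hi' : i < m+2 := List.mem_range.mp hi <;>
          simp only [Function.comp] <;> push_cast <;> omega)]
      rw [show browJ m (m+1) = wideRow m from by
        unfold browJ; rw [if_neg (by omega), if_neg (by omega), if_pos rfl]]
      rw [center_odd _ (6*(m:Int)+7) 0 (by
        simp [wideRow, len_halfRow]; omega)]
      rw [List.replicate_zero, List.nil_append, List.append_nil]
      rw [wideRow, wide_eq]
      congr 1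
      apply List.map_congr_left
      intro q hq
      have hq' : q < 6*m+7 := List.mem_range.mp hq
      refine if_congr ?_ rfl rfl
      simp only [List.mem_map, PySem.Set.mem_union, PySem.Set.mem_ofList, List.mem_range,
        Function.comp]
      constructor
      · rintro ⟨p, ⟨a, ⟨i, hi, rfl⟩ | ⟨i, hi, rfl⟩, rfl⟩, he⟩ <;> omega
      · rintro ⟨hr | hr, hpar⟩
        · refine ⟨↑0 + (2 * (0 + ((q/2 : Nat):Int))), ⟨2 * (0 + ((q/2 : Nat):Int)),
            Or.inl ⟨q/2, by omega, rfl⟩, rfl⟩, by push_cast; omega⟩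
        · refine ⟨↑0 + (6*(m:Int)+7-1-2*(0+(((6*m+6-q)/2 : Nat):Int))),
            ⟨6*(m:Int)+7-1-2*(0+(((6*m+6-q)/2 : Nat):Int)),
              Or.inr ⟨(6*m+6-q)/2, by omega, rfl⟩, rfl⟩, by push_cast; omega⟩
    · -- the waist rows (the last one is the pivot)
      rw [if_neg (by omega)]
      dsimp only
      rw [show (6:Int)*(m:Int)+7 - 2*(((jn:Nat):Int)-(m:Int)-1) = ((8*m+9-2*jn:Nat):Int) from by
        omega]
      rw [show ((8*m+9-2*jn:Nat):Int) - 1 = ((8*m+8-2*jn:Nat):Int) from by omega]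
      by_cases hp2 : jn = 2*m+2
      · -- the pivot row
        subst hp2
        rw [if_pos rfl]
        rw [show ((8*m+9-2*(2*m+2):Nat):Int) = ((4*m+5:Nat):Int) from by omega]
        rw [show ((8*m+8-2*(2*m+2):Nat):Int) = ((4*m+4:Nat):Int) from by omega]
        rw [show PySem.Int.floordiv ((4*m+5:Nat):Int) 2 = ((2*m+2:Nat):Int) from by
          rw [show (2:Int) = ((2:Nat):Int) from rfl, PySem.Int.floordiv_natCast]
          congr 1
          omega]
        rw [show max (((4*m+5:Nat):Int)) (6*(m:Int)+7) = 6*(m:Int)+7 from by omega]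
        rw [show ((6:Int)*(m:Int)+7).toNat = 6*m+7 from by omega]
        rw [show (6:Int)*(m:Int)+7 - ((4*m+5:Nat):Int) = ((2*(m+1):Nat):Int) from by
          push_cast; omega]
        rw [show PySem.Int.floordiv ((2*(m+1):Nat):Int) 2 = ((m+1:Nat):Int) from by
          rw [show (2:Int) = ((2:Nat):Int) from rfl, PySem.Int.floordiv_natCast]
          congr 1
          omega]
        rw [← List.foldl_map (f := fun p => ((m+1 : Nat):Int) + p)
          (g := fun cv p => PySem.List.pySetD cv p '*')]
        rw [paint_eq_map _ (6*m+7) (by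
          intro p hp
          rcases List.mem_map.mp hp with ⟨x, hx, rfl⟩
          rcases (PySem.Set.mem_add ..).mp hx with h | h
          · rcases List.mem_cons.mp ((PySem.Set.mem_ofList ..).mp h) with h' | h'
            · omega
            · rcases List.mem_cons.mp h' with h'' | h''
              · rw [h'']; positivity
              · simp at h''
          · rw [h]; positivity)]
        rw [show browJ m (2*m+2) = pivotRow m from by
          unfold browJ
          rw [if_neg (by omega), if_neg (by omega), if_neg (by omega), if_neg (by omega)]]
        rw [pivotRow]
        rw [center_odd _ (6*(m:Int)+7) (m+1) (by simp; omega)]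
        rw [row3_eq_map, show (m+1)+((2*m+1)+(2*m+1)+3)+(m+1) = 6*m+7 from by omega]
        congr 1
        apply List.map_congr_left
        intro q hq
        have hq' : q < 6*m+7 := List.mem_range.mp hq
        refine if_congr ?_ rfl rfl
        simp only [List.mem_map, PySem.Set.mem_add, PySem.Set.mem_ofList, List.mem_cons,
          List.not_mem_nil, or_false, or_assoc, exists_eq_or_imp, exists_eq_left,
          exists_eq_right]
        push_cast
        omega
      · -- an ordinary waist row
        rw [if_neg (fun h => hp2 (by exact_mod_cast h))]
        rw [show max (((8*m+9-2*jn:Nat):Int)) (6*(m:Int)+7) = 6*(m:Int)+7 from by omega]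
        rw [show ((6:Int)*(m:Int)+7).toNat = 6*m+7 from by omega]
        rw [show (6:Int)*(m:Int)+7 - ((8*m+9-2*jn:Nat):Int) = ((2*(jn-m-1):Nat):Int) from by
          omega]
        rw [show PySem.Int.floordiv ((2*(jn-m-1):Nat):Int) 2 = ((jn-m-1:Nat):Int) from by
          rw [show (2:Int) = ((2:Nat):Int) from rfl, PySem.Int.floordiv_natCast]
          congr 1
          omega]
        rw [← List.foldl_map (f := fun p => ((jn-m-1 : Nat):Int) + p)
          (g := fun cv p => PySem.List.pySetD cv p '*')]
        rw [paint_eq_map _ (6*m+7) (by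
          intro p hp
          rcases List.mem_map.mp hp with ⟨x, hx, rfl⟩
          rcases List.mem_cons.mp ((PySem.Set.mem_ofList ..).mp hx) with h | h
          · omega
          · rcases List.mem_cons.mp h with h' | h'
            · rw [h']; positivity
            · simp at h')]
        rw [show browJ m jn = ['*'] ++ List.replicate (8*m+7-2*jn) ' ' ++ ['*'] from by
          unfold browJ
          rw [if_neg (by omega), if_neg h0, if_neg h1, if_pos (by omega)]]
        rw [show (['*'] ++ List.replicate (8*m+7-2*jn) ' ' ++ ['*'] : List Char)
            = ['*'] ++ (List.replicate (8*m+7-2*jn) ' ' ++ ['*']) from by simp]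
        rw [center_odd _ (6*(m:Int)+7) (jn-m-1) (by simp; omega)]
        rw [show (['*'] ++ (List.replicate (8*m+7-2*jn) ' ' ++ ['*']) : List Char)
            = ['*'] ++ List.replicate (8*m+7-2*jn) ' ' ++ ['*'] from by simp]
        rw [row2_eq_map, show (jn-m-1)+((8*m+7-2*jn)+2)+(jn-m-1) = 6*m+7 from by omega]
        congr 1
        apply List.map_congr_left
        intro q hq
        have hq' : q < 6*m+7 := List.mem_range.mp hq
        refine if_congr ?_ rfl rfl
        simp only [List.mem_map, PySem.Set.mem_ofList, List.mem_cons, List.not_mem_nil, or_false,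
          exists_eq_or_imp, exists_eq_left, exists_eq_right]
        omega


lemma star_eq_alt_aux (m : Nat) : _root_.star ((m:Int)+2) = star_alt ((m:Int)+2) := by
  rw [starA_eval, starB_eval, allRows_eq, List.map_map]
  rfl

-- the degenerate sizes: both programs return ['*','*','*'] for every n ≤ 0
lemma pyCenter_of_le (cs : List Char) (w : Int) (h : w.toNat ≤ cs.length) :
    pyCenter cs w = cs := by
  unfold pyCenter
  simp [Nat.sub_eq_zero_of_le h]

lemma map_center_degenerate (c : Int) (hc : c.toNat = 0) (L : List (List Char)) :
    L.map (fun row => String.ofList (pyCenter row c)) = L.map (fun row => String.ofList row) :=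
  List.map_congr_left (fun r _ => by rw [pyCenter_of_le r c (by omega)])

lemma star_nonpos (n : Int) (h : n ≤ 0) : _root_.star n = ["*", "*", "*"] := by
  unfold _root_.star
  dsimp only
  rw [PySem.List.pyRange_one_eq_nil (by omega : n-2 ≤ 0),
    PySem.List.pyRange_one_eq_nil (by omega : n-1 ≤ 0)]
  rw [show n.toNat = 0 from by omega]
  dsimp only [List.foldl_nil]
  rw [map_center_degenerate _ (by omega : ((n + n - 1) * 2 + n - 1 + n - 2).toNat = 0)]
  decide

lemma star_alt_nonpos (n : Int) (h : n ≤ 0) : star_alt n = ["*", "*", "*"] := by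
  unfold star_alt
  dsimp only
  rw [show max (n-2) 0 = 0 from by omega, show max (n-1) 0 = 0 from by omega]
  rw [show n.toNat = 0 from by omega]
  rw [PySem.List.pyRange_one_eq_nil (by omega : n ≤ 0)]
  rw [show (2:Int) * PySem.Chars.len (PySem.Chars.join [' '] (List.replicate 0 ['*'])) + 2*0 + 1
      = 1 from by decide]
  rw [show PySem.List.pyRange 0 (2*((0:Int)+0+2)-1) 1 = [0, 1, 2] from by decide]
  simp only [List.foldl_cons, List.foldl_nil, List.map_nil]
  norm_num
  rw [show max (1:Int) (6*n-5) = 1 from by omega]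
  decide

-- ===== VERDICT (by name: the statement is the Claim_ definition above) =====
theorem star_spec : Claim_equal_star := by
  intro n _hd
  unfold Spec_star
  by_cases h2 : 2 ≤ n
  · have hn : n = (((n-2).toNat : Nat) : Int) + 2 := by omega
    rw [hn]
    exact star_eq_alt_aux (n-2).toNat
  · by_cases h1 : n = 1
    · subst h1
      decide
    · rw [star_nonpos n (by omega), star_alt_nonpos n (by omega)]
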